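-- pv_equiv track=rewrite | github.com/theomatas/DM_TDG | lib/matrix_2.py | in_out
-- ===== SOURCE A (Python) =====
-- def in_out(M):
--   m = len(M)
--   in_ = [0]*m
--   out_ = [0]*m
--   x = 0
--   while x < m:
--     y = 0
--     s = 0
--     while y < m:
--       if M[y][x] != None:
--         s += 1
--       y += 1
--     if s == 0:
--       in_[x] = 1
--     x += 1
--   x = 0
--   while x < m:
--     y = 0
--     s = 0
--     while y < m:
--       if M[x][y] != None:
--         s += 1
--       y += 1
--     if s == 0:
--       out_[x] = 1
--     x += 1
--   return [in_,out_]
-- ===== SOURCE B (Python) =====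
-- def in_out(M):
--   m = len(M)
--   in_ = [1]*m
--   out_ = [1]*m
--   for i in range(m):
--     for j in range(m):
--       if M[i][j] != None:
--         out_[i] = 0
--         in_[j] = 0
--   return [in_, out_]
-- ===== Notes on version B (the rewrite author's own statement) =====
-- stated objective: simpler
-- what changed: One combined pass that starts every row/column flag at 1 and clears it the moment a non-None cell is seen, instead of A's two separate counting scans (one per direction) that count non-None cells and compare the count with 0.
import Mathlib
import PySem

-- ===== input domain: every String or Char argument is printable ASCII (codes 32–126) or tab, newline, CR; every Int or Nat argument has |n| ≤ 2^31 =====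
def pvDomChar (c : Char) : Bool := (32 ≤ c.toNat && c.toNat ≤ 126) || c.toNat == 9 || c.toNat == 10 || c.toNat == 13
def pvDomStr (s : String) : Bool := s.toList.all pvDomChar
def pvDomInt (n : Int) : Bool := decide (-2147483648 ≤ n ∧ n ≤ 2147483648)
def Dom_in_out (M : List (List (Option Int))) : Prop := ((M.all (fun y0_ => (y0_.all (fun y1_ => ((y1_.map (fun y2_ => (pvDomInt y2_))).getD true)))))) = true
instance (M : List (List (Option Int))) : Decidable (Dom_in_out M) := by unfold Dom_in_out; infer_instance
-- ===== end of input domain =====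

-- B replaces A's two separate counting scans by one combined pass that clears the
-- row/column flags as soon as a non-None cell is seen (objective: simpler).

-- ===== PORT A =====
def in_out (M : List (List (Option Int))) : List (List Int) :=
  let m := M.length
  -- first while loop: for each x count non-None cells in column x, flag if count is 0
  let in_ := (List.range m).map (fun x =>
    let s := (List.range m).foldl (fun s y => if (M.getD y []).getD x none ≠ none then s + 1 else s) (0 : Int)
    if s = 0 then (1 : Int) else 0)
  -- second while loop: for each x count non-None cells in row x, flag if count is 0
  let out_ := (List.range m).map (fun x =>
    let s := (List.range m).foldl (fun s y => if (M.getD x []).getD y none ≠ none then s + 1 else s) (0 : Int)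
    if s = 0 then (1 : Int) else 0)
  [in_, out_]

-- ===== PORT B =====
def in_out_alt (M : List (List (Option Int))) : List (List Int) :=
  let m := M.length
  let st := (List.range m).foldl (fun (p : List Int × List Int) i =>
      (List.range m).foldl (fun (q : List Int × List Int) j =>
        if (M.getD i []).getD j none ≠ none then (q.1.set j 0, q.2.set i 0) else q) p)
    (List.replicate m (1 : Int), List.replicate m (1 : Int))
  [st.1, st.2]

-- ===== PRECONDITION & SPEC =====
-- Pre_ excludes exactly the ragged matrices (a row shorter than len(M)), on which
-- both A and B raise IndexError.
def Pre_in_out (M : List (List (Option Int))) : Prop :=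
  ∀ row ∈ M, M.length ≤ row.length
instance (M : List (List (Option Int))) : Decidable (Pre_in_out M) := by unfold Pre_in_out; infer_instance

def pvWitness_in_out : List (List (Option Int)) := [[none, some 3], [some 1, none]]

def Spec_in_out (M : List (List (Option Int))) (out : List (List Int)) : Prop := out = in_out_alt M
instance (M : List (List (Option Int))) (out : List (List Int)) : Decidable (Spec_in_out M out) := by unfold Spec_in_out; infer_instance

-- ===== CLAIM (what is proved, stated in full; the proofs are below) =====
def Claim_equal_in_out : Prop := ∀ (M : List (List (Option Int))), Dom_in_out M → Pre_in_out M → Spec_in_out M (in_out M)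

-- ===== LEMMAS AND PROOFS =====

theorem getD_set (l : List Int) (j k : Nat) (a d : Int) :
    (l.set j a).getD k d = if k = j ∧ j < l.length then a else l.getD k d := by
  rw [List.getD_eq_getElem?_getD, List.getD_eq_getElem?_getD, List.getElem?_set]
  by_cases he : k = j
  · subst he
    by_cases hl : k < l.length <;> simp [hl]
  · simp [Ne.symm he, he]

-- pointwise value and length of a fold that sets flagged positions to 0
theorem setfold_getD (c : Nat → Prop) [DecidablePred c] (l : List Nat) (v : List Int) (k : Nat) :
    (l.foldl (fun (v : List Int) j => if c j then v.set j 0 else v) v).getD k 0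
      = if k ∈ l ∧ c k ∧ k < v.length then 0 else v.getD k 0 := by
  induction l generalizing v with
  | nil => simp
  | cons j t ih =>
    simp only [List.foldl_cons, List.mem_cons]
    by_cases hj : c j
    · rw [if_pos hj, ih, List.length_set, getD_set]
      by_cases hk : k = j
      · subst hk
        by_cases hl : k < v.length <;> by_cases ht : k ∈ t <;> simp [hj, hl, ht]
      · simp [hk]
    · rw [if_neg hj, ih]
      by_cases hk : k = j
      · subst hk; simp [hj]
      · simp [hk]

theorem setfold_length (c : Nat → Prop) [DecidablePred c] (l : List Nat) (v : List Int) :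
    (l.foldl (fun (v : List Int) j => if c j then v.set j 0 else v) v).length = v.length := by
  induction l generalizing v with
  | nil => rfl
  | cons j t ih =>
    simp only [List.foldl_cons]
    split_ifs
    · rw [ih, List.length_set]
    · rw [ih]

-- B's inner loop over one row, split into its effect on the two flag lists
theorem inner_fold (c : Nat → Prop) [DecidablePred c] (i : Nat) (l : List Nat) (p : List Int × List Int) :
    l.foldl (fun (q : List Int × List Int) j =>
        if c j then (q.1.set j 0, q.2.set i 0) else q) p
      = (l.foldl (fun (v : List Int) j => if c j then v.set j 0 else v) p.1,
         if ∃ j ∈ l, c j then p.2.set i 0 else p.2) := by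
  induction l generalizing p with
  | nil => simp
  | cons j t ih =>
    simp only [List.foldl_cons]
    by_cases hj : c j
    · simp only [if_pos hj, ih]
      have : (∃ x ∈ j :: t, c x) := ⟨j, List.mem_cons_self, hj⟩
      rw [if_pos this]
      split_ifs <;> simp [List.set_set]
    · simp only [if_neg hj, ih]
      congr 1
      have : (∃ x ∈ j :: t, c x) ↔ (∃ x ∈ t, c x) := by
        constructor
        · rintro ⟨x, hx, hcx⟩
          rcases List.mem_cons.mp hx with h | h
          · exact absurd (h ▸ hcx) hj
          · exact ⟨x, h, hcx⟩
        · rintro ⟨x, hx, hcx⟩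
          exact ⟨x, List.mem_cons_of_mem _ hx, hcx⟩
      rw [if_congr this rfl rfl]

-- B's outer loop, as a pair of independent folds
theorem outer_fold (M : List (List (Option Int))) (l : List Nat) (p : List Int × List Int) :
    (l.foldl (fun (p : List Int × List Int) i =>
        (List.range M.length).foldl (fun (q : List Int × List Int) j =>
          if (M.getD i []).getD j none ≠ none then (q.1.set j 0, q.2.set i 0) else q) p) p)
    = (l.foldl (fun (v : List Int) i =>
        (List.range M.length).foldl (fun (v : List Int) j => if (M.getD i []).getD j none ≠ none then v.set j 0 else v) v) p.1,
       l.foldl (fun (w : List Int) i =>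
        if ∃ j ∈ List.range M.length, (M.getD i []).getD j none ≠ none then w.set i 0 else w) p.2) := by
  induction l generalizing p with
  | nil => rfl
  | cons i t ih =>
    simp only [List.foldl_cons]
    rw [inner_fold, ih]

-- the first component of B's outer fold, pointwise
theorem outercol_getD (c : Nat → Nat → Prop) [inst : ∀ i j, Decidable (c i j)] (m : Nat)
    (l : List Nat) (v : List Int) (k : Nat) :
    (l.foldl (fun (v : List Int) i =>
        (List.range m).foldl (fun (v : List Int) j => if c i j then v.set j 0 else v) v) v).getD k 0
      = if (∃ i ∈ l, c i k) ∧ k ∈ List.range m ∧ k < v.length then 0 else v.getD k 0 := by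
  induction l generalizing v with
  | nil => simp
  | cons i t ih =>
    simp only [List.foldl_cons]
    rw [ih, setfold_length, setfold_getD]
    simp only [List.exists_mem_cons_iff]
    by_cases hc : c i k
    · simp only [hc, true_or, true_and]
      by_cases hR : k ∈ List.range m ∧ k < v.length
      · rw [if_pos hR]
        split_ifs <;> rfl
      · have h1 : ¬((∃ i ∈ t, c i k) ∧ k ∈ List.range m ∧ k < v.length) :=
          fun h => hR ⟨h.2.1, h.2.2⟩
        rw [if_neg h1, if_neg hR]
    · simp only [hc, false_or, false_and, and_false, if_false]

-- A's counter: s = 0 exactly when no visited cell is non-None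
theorem count_ge (c : Nat → Prop) [DecidablePred c] (l : List Nat) (s : Int) :
    s ≤ l.foldl (fun (s : Int) y => if c y then s + 1 else s) s := by
  induction l generalizing s with
  | nil => simp
  | cons y t ih =>
    rw [List.foldl_cons]
    split_ifs
    · have := ih (s + 1)
      omega
    · exact ih s

theorem count_zero_iff (c : Nat → Prop) [DecidablePred c] (l : List Nat) :
    (l.foldl (fun (s : Int) y => if c y then s + 1 else s) 0 = 0) ↔ ¬ ∃ y ∈ l, c y := by
  induction l with
  | nil => simp
  | cons y t ih =>
    rw [List.foldl_cons]
    by_cases hy : c y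
    · rw [if_pos hy]
      constructor
      · intro h
        have := count_ge c t (0 + 1)
        omega
      · intro h
        exact absurd ⟨y, List.mem_cons_self, hy⟩ h
    · rw [if_neg hy, ih]
      have hcons : (∃ x ∈ y :: t, c x) ↔ (∃ x ∈ t, c x) := by
        constructor
        · rintro ⟨x, hx, hcx⟩
          rcases List.mem_cons.mp hx with h | h
          · exact absurd (h ▸ hcx) hy
          · exact ⟨x, h, hcx⟩
        · rintro ⟨x, hx, hcx⟩
          exact ⟨x, List.mem_cons_of_mem _ hx, hcx⟩
      exact not_congr hcons.symm

theorem map_eq_of_getD {f : Nat → Int} {l : List Int} {m : Nat}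
    (h : ∀ k, k < m → l.getD k 0 = f k) (hlen : l.length = m) :
    (List.range m).map f = l := by
  apply List.ext_getElem
  · rw [List.length_map, List.length_range, hlen]
  · intro k h1 h2
    have hk : k < m := by simpa using h1
    rw [List.getElem_map, List.getElem_range, ← List.getD_eq_getElem l 0 h2, h k hk]

theorem in_out_eq (M : List (List (Option Int))) : in_out M = in_out_alt M := by
  simp only [in_out, in_out_alt]
  rw [outer_fold]
  dsimp only
  have hlen2 : ∀ (l : List Nat) (v : List Int),
      (l.foldl (fun (v : List Int) i =>
        (List.range M.length).foldl (fun (v : List Int) j => if (M.getD i []).getD j none ≠ none then v.set j 0 else v) v) v).length = v.length := by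
    intro l v
    induction l generalizing v with
    | nil => rfl
    | cons i t ih => rw [List.foldl_cons, ih, setfold_length]
  congr 1
  · -- column flags
    apply map_eq_of_getD
    · intro k hk
      have hrep : (List.replicate M.length (1 : Int)).getD k 0 = 1 := by
        rw [List.getD_eq_getElem?_getD, List.getElem?_replicate]
        simp [hk]
      rw [outercol_getD (fun i j => (M.getD i []).getD j none ≠ none), hrep]
      simp only [List.length_replicate, List.mem_range, hk, and_true]
      split_ifs with hb ha ha
      · rw [count_zero_iff] at ha
        exact absurd (by simpa using hb) ha
      · rfl
      · rfl
      · rw [count_zero_iff, not_not] at ha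
        exact absurd (by simpa using ha) hb
    · rw [hlen2, List.length_replicate]
  congr 1
  · -- row flags
    apply map_eq_of_getD
    · intro k hk
      have hrep : (List.replicate M.length (1 : Int)).getD k 0 = 1 := by
        rw [List.getD_eq_getElem?_getD, List.getElem?_replicate]
        simp [hk]
      rw [setfold_getD (fun i => ∃ j ∈ List.range M.length, (M.getD i []).getD j none ≠ none), hrep]
      simp only [List.length_replicate, List.mem_range, hk, and_true, true_and]
      split_ifs with hb ha ha
      · rw [count_zero_iff] at ha
        exact absurd (by simpa using hb) ha
      · rfl
      · rfl
      · rw [count_zero_iff, not_not] at ha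
        exact absurd (by simpa using ha) hb
    · rw [setfold_length, List.length_replicate]

-- ===== VERDICT (by name: the statement is the Claim_ definition above) =====
theorem in_out_spec : Claim_equal_in_out := by
  intro M _ _
  unfold Spec_in_out
  exact in_out_eq M
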